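-- pv_equiv track=rewrite | github.com/le1205/Search | UserNameGen/username.py | generate_symbol_names
-- ===== SOURCE A (Python) =====
-- def generate_symbol_names(name, symbol):
--     merge_name = ''.join(name)
--     with_dashes = []
--     looplen = len(merge_name)
--     if looplen > 30:
--         looplen = 30
--     for i in range(1, 2**(min(30, looplen - 1))):
--         binary = bin(i)[2:].zfill(len(merge_name)-1)
--         combination = merge_name[0]
--         for j in range(len(binary)):
--             if binary[j] == '1':
--                 combination += symbol
--             combination += merge_name[j+1]
--         with_dashes.append(combination)
--     return with_dashes
-- ===== SOURCE B (Python) =====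
-- def generate_symbol_names(name, symbol):
--     merge_name = ''.join(name)
--     looplen = min(30, len(merge_name))
--     k = looplen - 1  # number of varying (trailing) gaps; leading gaps are forced no-symbol
--     prefix = merge_name[:len(merge_name) - k]
--     rest = merge_name[len(merge_name) - k:]
--
--     def enum(acc, rest):
--         if not rest:
--             return [acc]
--         return enum(acc + rest[0], rest[1:]) + enum(acc + symbol + rest[0], rest[1:])
--
--     return enum(prefix, rest)[1:]
-- ===== Notes on version B (the rewrite author's own statement) =====
-- stated objective: alternative
-- what changed: B replaces the integer counter with bin()/zfill decoding and an indexed inner loop by a direct recursive enumeration of the insert/no-insert choice for each varying gap (no-symbol branch first, first gap outermost), then drops the leading all-no-symbol string.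
import Mathlib
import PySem

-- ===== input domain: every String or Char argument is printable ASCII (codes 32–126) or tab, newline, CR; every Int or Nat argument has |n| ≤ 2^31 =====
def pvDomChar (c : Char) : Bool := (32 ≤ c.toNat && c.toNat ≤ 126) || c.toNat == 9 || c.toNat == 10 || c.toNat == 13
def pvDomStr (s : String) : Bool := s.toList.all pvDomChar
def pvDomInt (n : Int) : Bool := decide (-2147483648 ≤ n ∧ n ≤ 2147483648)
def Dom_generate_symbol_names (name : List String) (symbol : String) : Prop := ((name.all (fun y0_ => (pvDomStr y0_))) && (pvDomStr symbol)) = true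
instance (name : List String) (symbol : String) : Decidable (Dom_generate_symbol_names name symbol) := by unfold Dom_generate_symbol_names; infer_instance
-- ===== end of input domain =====

-- B enumerates the per-gap insert/no-insert choices recursively instead of decoding an integer counter via bin()/zfill (alternative decomposition, same cost); where A raises (empty joined name) B returns [].


-- ===== PORT A =====
-- zfill: pad with '0' on the left to width w
def pvZfill (w : Nat) (s : List Char) : List Char := List.replicate (w - s.length) '0' ++ s

-- bin(i)[2:] for i > 0, digit by repeated division (MSB first), exactly Python's digits
def pvBinDigits : Nat → List Char
  | 0 => []
  | n + 1 => pvBinDigits ((n + 1) / 2) ++ [if (n + 1) % 2 == 1 then '1' else '0']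
decreasing_by exact Nat.div_lt_self (Nat.succ_pos n) (by norm_num)

def pvBin (i : Nat) : List Char := if i = 0 then ['0'] else pvBinDigits i

def generate_symbol_names (name : List String) (symbol : String) : List String :=
  let merge := (name.map String.toList).flatten      -- ''.join(name)
  let looplen0 := merge.length
  let looplen := if looplen0 > 30 then 30 else looplen0
  -- Python: for i in range(1, 2**(min(30, looplen - 1))); on an empty merge Python raises TypeError
  -- (2**(-1) is a float bound for range) — Pre_ excludes exactly that input
  (List.range' 1 (2 ^ (min 30 (looplen - 1)) - 1)).map (fun i =>
    let binary := pvZfill (merge.length - 1) (pvBin i)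
    String.mk ((List.range binary.length).foldl
      (fun comb j =>
        (if binary[j]! == '1' then comb ++ symbol.toList else comb) ++ [merge[j + 1]!])
      [merge[0]!]))

-- ===== PORT B =====
-- enumerate the insert/no-insert choice for each remaining gap, no-symbol branch first
def gsnEnum (symbol : List Char) (acc : List Char) : List Char → List (List Char)
  | [] => [acc]
  | c :: rs => gsnEnum symbol (acc ++ [c]) rs ++ gsnEnum symbol (acc ++ symbol ++ [c]) rs

def generate_symbol_names_alt (name : List String) (symbol : String) : List String :=
  let merge := (name.map String.toList).flatten
  let looplen := min 30 merge.length
  let k := looplen - 1   -- Python's int k; Nat subtraction gives the same prefix/rest split on every input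
  let pre := merge.take (merge.length - k)
  let rest := merge.drop (merge.length - k)
  ((gsnEnum symbol.toList pre rest).drop 1).map String.mk

-- ===== PRECONDITION & SPEC =====
-- Pre_ excludes exactly the inputs where ''.join(name) is empty: there Python A raises TypeError
def Pre_generate_symbol_names (name : List String) (symbol : String) : Prop :=
  (name.map String.toList).flatten ≠ []
instance (name : List String) (symbol : String) : Decidable (Pre_generate_symbol_names name symbol) := by
  unfold Pre_generate_symbol_names; infer_instance

def pvWitness_generate_symbol_names : List String × String := (["ab", "c"], "-")

def Spec_generate_symbol_names (name : List String) (symbol : String) (out : List String) : Prop := out = generate_symbol_names_alt name symbol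
instance (name : List String) (symbol : String) (out : List String) : Decidable (Spec_generate_symbol_names name symbol out) := by unfold Spec_generate_symbol_names; infer_instance

-- ===== CLAIM (what is proved, stated in full; the proofs are below) =====
def Claim_equal_generate_symbol_names : Prop := ∀ (name : List String) (symbol : String), Dom_generate_symbol_names name symbol → Pre_generate_symbol_names name symbol → Spec_generate_symbol_names name symbol (generate_symbol_names name symbol)

-- ===== LEMMAS AND PROOFS =====

-- width-w binary representation of i, MSB first (helper for the proofs only)
def bitsD : Nat → Nat → List Bool
  | 0, _ => []
  | w + 1, i => bitsD w (i / 2) ++ [i % 2 == 1]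

def toBitChar (b : Bool) : Char := if b then '1' else '0'

-- common shape both ports are reduced to: walk the gaps, inserting sym where the bit is set
def buildBits (sym : List Char) (acc : List Char) : List Bool → List Char → List Char
  | b :: bs, c :: cs => buildBits sym (acc ++ (if b then sym else []) ++ [c]) bs cs
  | _, _ => acc

theorem bitsD_length (w i : Nat) : (bitsD w i).length = w := by
  induction w generalizing i with
  | zero => rfl
  | succ w ih => simp [bitsD, ih]

theorem bitsD_zero (w : Nat) : bitsD w 0 = List.replicate w false := by
  induction w with
  | zero => rfl
  | succ w ih => simp [bitsD, ih, List.replicate_succ']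

theorem bitsD_cons_false (m i : Nat) (h : i < 2 ^ m) :
    bitsD (m + 1) i = false :: bitsD m i := by
  induction m generalizing i with
  | zero => interval_cases i; rfl
  | succ m ih =>
    have hp : (2 : Nat) ^ (m + 1) = 2 ^ m * 2 := pow_succ 2 m
    have hd : i / 2 < 2 ^ m := by omega
    show bitsD (m + 1) (i / 2) ++ [i % 2 == 1] = false :: bitsD (m + 1) i
    rw [ih _ hd]
    simp [bitsD]

theorem bitsD_cons_true (m i : Nat) (h : i < 2 ^ m) :
    bitsD (m + 1) (2 ^ m + i) = true :: bitsD m i := by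
  induction m generalizing i with
  | zero => interval_cases i; rfl
  | succ m ih =>
    have hp : (2 : Nat) ^ (m + 1) = 2 ^ m * 2 := pow_succ 2 m
    have hp2 : (2 : Nat) ^ (m + 2) = 2 ^ (m + 1) * 2 := pow_succ 2 (m + 1)
    have hdiv : (2 ^ (m + 1) + i) / 2 = 2 ^ m + i / 2 := by omega
    have hmod : (2 ^ (m + 1) + i) % 2 = i % 2 := by omega
    have hd : i / 2 < 2 ^ m := by omega
    show bitsD (m + 1) ((2 ^ (m + 1) + i) / 2) ++ [(2 ^ (m + 1) + i) % 2 == 1]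
        = true :: bitsD (m + 1) i
    rw [hdiv, hmod, ih _ hd]
    simp [bitsD]

theorem bitsD_pad (w e i : Nat) (hew : e ≤ w) (h : i < 2 ^ e) :
    bitsD w i = List.replicate (w - e) false ++ bitsD e i := by
  induction w with
  | zero => interval_cases e; simp
  | succ w ih =>
    rcases Nat.lt_or_ge e (w + 1) with he | he
    · have he' : e ≤ w := by omega
      have hi : i < 2 ^ w := lt_of_lt_of_le h (Nat.pow_le_pow_right (by norm_num) he')
      rw [bitsD_cons_false w i hi, ih he']
      have : w + 1 - e = (w - e) + 1 := by omega
      rw [this, List.replicate_succ]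
      rfl
    · have : e = w + 1 := by omega
      subst this
      simp

theorem zfill_append_singleton (w : Nat) (s : List Char) (c : Char) :
    pvZfill (w + 1) (s ++ [c]) = pvZfill w s ++ [c] := by
  simp [pvZfill, Nat.succ_sub_succ]

theorem zfill_binDigits (w i : Nat) (h : i < 2 ^ w) :
    pvZfill w (pvBinDigits i) = (bitsD w i).map toBitChar := by
  induction w generalizing i with
  | zero => interval_cases i; simp [pvBinDigits, pvZfill, bitsD]
  | succ w ih =>
    match i with
    | 0 =>
      rw [bitsD_zero]
      simp [pvBinDigits, pvZfill, toBitChar]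
    | j + 1 =>
      have hp : (2 : Nat) ^ (w + 1) = 2 ^ w * 2 := pow_succ 2 w
      have hd : (j + 1) / 2 < 2 ^ w := by omega
      rw [pvBinDigits]
      simp only [bitsD]
      rw [zfill_append_singleton, ih _ hd]
      simp [toBitChar]

theorem fold_eq_buildBits (sym : List Char) (bs : List Bool) (ms : List Char) (acc : List Char)
    (h : bs.length = ms.length) :
    (List.range bs.length).foldl
      (fun comb j => (if (bs.map toBitChar)[j]! == '1' then comb ++ sym else comb) ++ [ms[j]!]) acc
      = buildBits sym acc bs ms := by
  induction bs generalizing ms acc with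
  | nil => cases ms <;> simp [buildBits]
  | cons b bs ih =>
    match ms with
    | [] => simp at h
    | c :: cs =>
      have h' : bs.length = cs.length := by simpa using h
      simp only [List.length_cons, List.range_succ_eq_map, List.foldl_cons, List.foldl_map]
      have hstep : ((if (((b :: bs).map toBitChar)[0]!) == '1' then acc ++ sym else acc) ++ [(c :: cs)[0]!])
          = acc ++ (if b then sym else []) ++ [c] := by
        cases b <;> simp [toBitChar]
      rw [hstep]
      have hfun : (fun (comb : List Char) (j : Nat) =>
            (if (((b :: bs).map toBitChar)[j.succ]!) == '1' then comb ++ sym else comb) ++ [(c :: cs)[j.succ]!])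
          = (fun comb j => (if (bs.map toBitChar)[j]! == '1' then comb ++ sym else comb) ++ [cs[j]!]) := by
        funext comb j
        simp
      rw [hfun, ih cs _ h']
      rfl

theorem gsnEnum_eq_range (sym : List Char) (rest : List Char) (acc : List Char) :
    gsnEnum sym acc rest
      = (List.range (2 ^ rest.length)).map (fun i => buildBits sym acc (bitsD rest.length i) rest) := by
  induction rest generalizing acc with
  | nil => simp [gsnEnum, List.range_one, buildBits, bitsD]
  | cons c rs ih =>
    have hpow : 2 ^ (c :: rs).length = 2 ^ rs.length + 2 ^ rs.length := by
      simp [List.length_cons, pow_succ]; ring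
    rw [show gsnEnum sym acc (c :: rs)
          = gsnEnum sym (acc ++ [c]) rs ++ gsnEnum sym (acc ++ sym ++ [c]) rs from rfl,
        ih, ih, hpow, List.range_add, List.map_append, List.map_map]
    congr 1
    · apply List.map_congr_left
      intro i hi
      rw [List.mem_range] at hi
      rw [show (c :: rs).length = rs.length + 1 from rfl, bitsD_cons_false rs.length i hi]
      show buildBits sym (acc ++ [c]) (bitsD rs.length i) rs
          = buildBits sym (acc ++ (if false then sym else []) ++ [c]) (bitsD rs.length i) rs
      simp
    · apply List.map_congr_left
      intro i hi
      rw [List.mem_range] at hi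
      simp only [Function.comp_apply]
      rw [show (c :: rs).length = rs.length + 1 from rfl, bitsD_cons_true rs.length i hi]
      rfl

theorem buildBits_skip (sym : List Char) (acc : List Char) (xs : List Char) (bs : List Bool)
    (ys : List Char) :
    buildBits sym acc (List.replicate xs.length false ++ bs) (xs ++ ys)
      = buildBits sym (acc ++ xs) bs ys := by
  induction xs generalizing acc with
  | nil => simp
  | cons x xs ih =>
    show buildBits sym (acc ++ (if false then sym else []) ++ [x]) (List.replicate xs.length false ++ bs) (xs ++ ys)
        = buildBits sym (acc ++ (x :: xs)) bs ys
    rw [show acc ++ (if false then sym else []) ++ [x] = acc ++ [x] by simp, ih]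
    simp

-- ===== VERDICT (by name: the statement is the Claim_ definition above) =====
theorem generate_symbol_names_spec : Claim_equal_generate_symbol_names := by
  intro name symbol _ hpre
  unfold Spec_generate_symbol_names generate_symbol_names generate_symbol_names_alt
  unfold Pre_generate_symbol_names at hpre
  cases hmerge : (name.map String.toList).flatten with
  | nil => exact absurd hmerge hpre
  | cons m0 ms =>
    dsimp only
    set n := (m0 :: ms).length with hn
    have hn' : n = ms.length + 1 := rfl
    set k := min 30 n - 1 with hk
    have hEA : min 30 ((if n > 30 then 30 else n) - 1) = k := by
      rw [hk]; split_ifs <;> omega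
    have hkle : k ≤ ms.length := by omega
    have hrestlen : ((m0 :: ms).drop (n - k)).length = k := by
      rw [List.length_drop]; omega
    rw [hEA, gsnEnum_eq_range, hrestlen]
    have hrange : (List.range (2 ^ k)).drop 1 = List.range' 1 (2 ^ k - 1) := by
      rw [List.range_eq_range', show 2 ^ k = (2 ^ k - 1) + 1 by have := Nat.one_le_two_pow (n := k); omega, List.range'_succ]
      simp
    rw [← List.map_drop, hrange, List.map_map]
    apply List.map_congr_left
    intro i hi
    rw [List.mem_range'_1] at hi
    obtain ⟨hi1, hi2⟩ := hi
    have hp1 : 1 ≤ 2 ^ k := Nat.one_le_two_pow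
    have hi2' : i < 2 ^ k := by omega
    have hiw : i < 2 ^ ms.length :=
      lt_of_lt_of_le hi2' (Nat.pow_le_pow_right (by norm_num) hkle)
    have hbin0 : pvBin i = pvBinDigits i := by
      unfold pvBin; rw [if_neg (by omega)]
    have hbinary : pvZfill (n - 1) (pvBin i) = (bitsD ms.length i).map toBitChar := by
      rw [show n - 1 = ms.length by omega, hbin0]
      exact zfill_binDigits ms.length i hiw
    simp only [Function.comp_apply, hbinary, List.length_map, bitsD_length]
    have hfun : (fun (comb : List Char) (j : Nat) =>
          (if ((bitsD ms.length i).map toBitChar)[j]! == '1' then comb ++ symbol.toList else comb)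
            ++ [(m0 :: ms)[j + 1]!])
        = (fun comb j =>
          (if ((bitsD ms.length i).map toBitChar)[j]! == '1' then comb ++ symbol.toList else comb)
            ++ [ms[j]!]) := by
      funext comb j; simp
    rw [show (m0 :: ms)[0]! = m0 by simp, hfun]
    rw [show List.range ms.length = List.range (bitsD ms.length i).length by rw [bitsD_length]]
    rw [fold_eq_buildBits symbol.toList _ ms [m0] (by rw [bitsD_length])]
    have htklen : (ms.take (ms.length - k)).length = ms.length - k := by
      rw [List.length_take]; omega
    have hpad : bitsD ms.length i = List.replicate (ms.length - k) false ++ bitsD k i :=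
      bitsD_pad ms.length k i hkle hi2'
    have hpre' : (m0 :: ms).take (n - k) = [m0] ++ ms.take (ms.length - k) := by
      rw [hn', show ms.length + 1 - k = (ms.length - k) + 1 by omega]
      rfl
    have hrest' : (m0 :: ms).drop (n - k) = ms.drop (ms.length - k) := by
      rw [hn', show ms.length + 1 - k = (ms.length - k) + 1 by omega]
      rfl
    congr 1
    rw [hpad, hpre', hrest']
    have hskip := buildBits_skip symbol.toList [m0] (ms.take (ms.length - k)) (bitsD k i) (ms.drop (ms.length - k))
    rw [htklen, List.take_append_drop] at hskip
    exact hskip
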